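-- pv_equiv track=rewrite | github.com/ifasrinivas/agritech-platform | backend/app/services/health_score.py | get_growth_stage
-- ===== SOURCE A (Python) =====
-- GROWTH_STAGES = [
--     {"name": "Germination",   "das": (0, 15),    "min": 0.10, "max": 0.25},
--     {"name": "Vegetative",    "das": (15, 45),   "min": 0.25, "max": 0.55},
--     {"name": "Active Growth", "das": (45, 75),   "min": 0.50, "max": 0.80},
--     {"name": "Peak/Flowering","das": (75, 100),  "min": 0.65, "max": 0.90},
--     {"name": "Maturity",      "das": (100, 130), "min": 0.50, "max": 0.75},
--     {"name": "Senescence",    "das": (130, 160), "min": 0.20, "max": 0.50},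
-- ]
--
-- def get_growth_stage(days_after_sowing: int | None) -> str | None:
--     if days_after_sowing is None or days_after_sowing < 0:
--         return None
--     stage = next(
--         (s for s in GROWTH_STAGES if s["das"][0] <= days_after_sowing < s["das"][1]),
--         GROWTH_STAGES[-1],
--     )
--     return stage["name"]
-- ===== SOURCE B (Python) =====
-- NAMES = ["Germination", "Vegetative", "Active Growth",
--          "Peak/Flowering", "Maturity", "Senescence"]
-- THRESHOLDS = [15, 45, 75, 100, 130]  # upper bounds; >= 130 falls into the last name
--
-- def get_growth_stage(days_after_sowing):
--     if days_after_sowing is None or days_after_sowing < 0: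
--         return None
--     lo, hi = 0, len(THRESHOLDS)
--     while lo < hi:
--         mid = (lo + hi) // 2
--         if THRESHOLDS[mid] <= days_after_sowing:
--             lo = mid + 1
--         else:
--             hi = mid
--     return NAMES[lo]
-- ===== Notes on version B (the rewrite author's own statement) =====
-- stated objective: alternative
-- what changed: Replaces the linear next() scan over interval dicts with a binary search over a sorted list of upper boundaries indexing a parallel names table (the >=160 fall-through to Senescence falls out of the index range naturally).
import Mathlib
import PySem

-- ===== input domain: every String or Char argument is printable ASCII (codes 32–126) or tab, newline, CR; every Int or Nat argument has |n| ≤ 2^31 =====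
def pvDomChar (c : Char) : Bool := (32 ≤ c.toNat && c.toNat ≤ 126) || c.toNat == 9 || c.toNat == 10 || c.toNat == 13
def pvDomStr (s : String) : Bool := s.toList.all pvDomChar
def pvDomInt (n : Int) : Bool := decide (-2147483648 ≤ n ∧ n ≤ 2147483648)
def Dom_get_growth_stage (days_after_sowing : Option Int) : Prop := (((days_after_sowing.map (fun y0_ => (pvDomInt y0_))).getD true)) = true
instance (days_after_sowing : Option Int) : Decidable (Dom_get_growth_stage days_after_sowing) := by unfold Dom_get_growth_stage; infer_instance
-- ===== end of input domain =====

-- B replaces A's linear scan over interval records with a binary search over sorted upper boundaries indexing a names table.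

-- ===== PORT A =====
-- GROWTH_STAGES as (name, das_lo, das_hi); the float min/max fields are unused by the function and omitted.
def growthStages : List (String × Int × Int) :=
  [("Germination", 0, 15), ("Vegetative", 15, 45), ("Active Growth", 45, 75),
   ("Peak/Flowering", 75, 100), ("Maturity", 100, 130), ("Senescence", 130, 160)]

def get_growth_stage (days_after_sowing : Option Int) : Option String :=
  match days_after_sowing with
  | none => none
  | some d =>
    if d < 0 then none
    else
      -- next((s for s in GROWTH_STAGES if lo <= d < hi), GROWTH_STAGES[-1])
      let stage := (growthStages.find? (fun s => decide (s.2.1 ≤ d ∧ d < s.2.2))).getD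
        ("Senescence", 130, 160)
      some stage.1

-- ===== PORT B =====
def bNames : List String :=
  ["Germination", "Vegetative", "Active Growth", "Peak/Flowering", "Maturity", "Senescence"]
def bThresholds : List Int := [15, 45, 75, 100, 130]

-- the while-loop of Source B; mid is always in range so THRESHOLDS[mid] is getD with a dummy default
def bSearch (d : Int) (lo hi : Nat) : Nat :=
  if _h : lo < hi then
    let mid := (lo + hi) / 2
    if bThresholds.getD mid 0 ≤ d then bSearch d (mid + 1) hi else bSearch d lo mid
  else lo
termination_by hi - lo
decreasing_by all_goals omega

def get_growth_stage_alt (days_after_sowing : Option Int) : Option String :=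
  match days_after_sowing with
  | none => none
  | some d =>
    if d < 0 then none
    else some (bNames.getD (bSearch d 0 bThresholds.length) "")

-- ===== PRECONDITION & SPEC =====
def Spec_get_growth_stage (days_after_sowing : Option Int) (out : Option String) : Prop := out = get_growth_stage_alt days_after_sowing
instance (days_after_sowing : Option Int) (out : Option String) : Decidable (Spec_get_growth_stage days_after_sowing out) := by unfold Spec_get_growth_stage; infer_instance

-- ===== CLAIM (what is proved, stated in full; the proofs are below) =====
def Claim_equal_get_growth_stage : Prop := ∀ (days_after_sowing : Option Int), Dom_get_growth_stage days_after_sowing → Spec_get_growth_stage days_after_sowing (get_growth_stage days_after_sowing)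

-- ===== LEMMAS AND PROOFS =====

-- fully evaluate the binary search in each of the seven intervals
lemma bSearch_lt15 {d : Int} (h0 : 0 ≤ d) (h : d < 15) : bSearch d 0 5 = 0 := by
  unfold bSearch bSearch bSearch bSearch bSearch; simp [bThresholds]; split_ifs <;> omega
lemma bSearch_15_45 {d : Int} (h0 : 15 ≤ d) (h : d < 45) : bSearch d 0 5 = 1 := by
  unfold bSearch bSearch bSearch bSearch bSearch; simp [bThresholds]; split_ifs <;> omega
lemma bSearch_45_75 {d : Int} (h0 : 45 ≤ d) (h : d < 75) : bSearch d 0 5 = 2 := by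
  unfold bSearch bSearch bSearch bSearch bSearch; simp [bThresholds]; split_ifs <;> omega
lemma bSearch_75_100 {d : Int} (h0 : 75 ≤ d) (h : d < 100) : bSearch d 0 5 = 3 := by
  unfold bSearch bSearch bSearch bSearch bSearch; simp [bThresholds]; split_ifs <;> omega
lemma bSearch_100_130 {d : Int} (h0 : 100 ≤ d) (h : d < 130) : bSearch d 0 5 = 4 := by
  unfold bSearch bSearch bSearch bSearch bSearch; simp [bThresholds]; split_ifs <;> omega
lemma bSearch_ge130 {d : Int} (h : 130 ≤ d) : bSearch d 0 5 = 5 := by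
  unfold bSearch bSearch bSearch bSearch bSearch; simp [bThresholds]; split_ifs <;> omega

-- ===== VERDICT (by name: the statement is the Claim_ definition above) =====
theorem get_growth_stage_spec : Claim_equal_get_growth_stage := by
  intro days _
  unfold Spec_get_growth_stage
  match days with
  | none => rfl
  | some d =>
    by_cases hneg : d < 0
    · simp [get_growth_stage, get_growth_stage_alt, hneg]
    · rw [not_lt] at hneg
      simp only [get_growth_stage, get_growth_stage_alt, if_neg (not_lt.mpr hneg),
        bThresholds, List.length]
      by_cases h1 : d < 15
      · rw [bSearch_lt15 hneg h1]
        simp [growthStages, bNames, hneg, h1]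
      · by_cases h2 : d < 45
        · rw [bSearch_15_45 (by omega) h2]
          simp [growthStages, List.find?, bNames, h1, h2, show (15:Int) ≤ d by omega]
        · by_cases h3 : d < 75
          · rw [bSearch_45_75 (by omega) h3]
            simp [growthStages, List.find?, bNames, h1, h2, h3, show (45:Int) ≤ d by omega]
          · by_cases h4 : d < 100
            · rw [bSearch_75_100 (by omega) h4]
              simp [growthStages, List.find?, bNames, h1, h2, h3, h4, show (75:Int) ≤ d by omega]
            · by_cases h5 : d < 130
              · rw [bSearch_100_130 (by omega) h5]
                simp [growthStages, List.find?, bNames, h1, h2, h3, h4, h5, show (100:Int) ≤ d by omega]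
              · by_cases h6 : d < 160
                · rw [bSearch_ge130 (by omega)]
                  simp [growthStages, List.find?, bNames, h1, h2, h3, h4, h5, h6, show (130:Int) ≤ d by omega]
                · rw [bSearch_ge130 (by omega)]
                  simp [growthStages, List.find?, bNames, h1, h2, h3, h4, h5, h6]
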